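-- pv_equiv track=rewrite | github.com/tsani/coding-cat-public | double_n-th/mutation_5.py | double_n_th
-- ===== SOURCE A (Python) =====
-- def double_n_th(string, n):
--     """
--     Bug: Forgets to join the list of characters into a string at the end.
--     """
--     if n <= 0 or not string:
--         return ""
--     if n > len(string):
--         return string
--
--     result = []
--     for i, char in enumerate(string):
--         if (i + 1) % n == 0:
--             result.append(char * 2)
--         else:
--             result.append(char)
--     return result
-- ===== SOURCE B (Python) =====
-- def double_n_th(string, n):
--     if n <= 0 or not string:
--         return ""
--     if n > len(string):
--         return string
--     result = list(string)
--     for i in range(n - 1, len(string), n):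
--         result[i] = result[i] * 2
--     return result
-- ===== Notes on version B (the rewrite author's own statement) =====
-- stated objective: alternative
-- what changed: Instead of enumerating every character and testing (i+1) % n == 0 per element, B converts the string to a list once and makes a sparse second pass that doubles only positions range(n-1, len(string), n), removing the per-element Python-level branch and modulo.
-- outside the precondition, e.g. on double_n_th('abc', 0): A returns '', B returns ''; on double_n_th('ab', 5): A returns 'ab', B returns 'ab'
import Mathlib
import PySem

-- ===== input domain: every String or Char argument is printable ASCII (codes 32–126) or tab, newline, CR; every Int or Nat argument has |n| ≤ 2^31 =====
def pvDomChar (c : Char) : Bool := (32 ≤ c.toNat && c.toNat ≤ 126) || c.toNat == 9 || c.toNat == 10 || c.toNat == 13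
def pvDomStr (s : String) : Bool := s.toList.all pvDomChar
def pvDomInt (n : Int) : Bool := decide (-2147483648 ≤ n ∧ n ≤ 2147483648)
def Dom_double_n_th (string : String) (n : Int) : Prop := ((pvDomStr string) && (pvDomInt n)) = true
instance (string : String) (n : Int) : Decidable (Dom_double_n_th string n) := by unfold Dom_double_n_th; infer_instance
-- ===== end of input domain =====

-- B doubles only the affected positions result[n-1], result[2n-1], … in a second sparse pass
-- over range(n-1, len, n), instead of A's per-character enumerate loop with a modulo test.

-- ===== PORT A =====
-- On the two guard branches Python A returns a str (""/string), not a list; those inputs are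
-- outside Pre_ below and the values returned here are placeholders of the declared List type.
def double_n_th (string : String) (n : Int) : List String :=
  if n ≤ 0 ∨ string.toList = [] then []
  else if n > (string.toList.length : Int) then [string]
  else
    (PySem.List.enumerate string.toList 0).foldl
      (fun result ic =>
        if PySem.Int.mod (ic.1 + 1) n = 0 then
          result ++ [String.ofList [ic.2, ic.2]]   -- char * 2: the two-character string
        else
          result ++ [String.ofList [ic.2]]) []

-- ===== PORT B =====
def double_n_th_alt (string : String) (n : Int) : List String :=
  if n ≤ 0 ∨ string.toList = [] then []
  else if n > (string.toList.length : Int) then [string]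
  else
    (PySem.List.pyRange (n - 1) (string.toList.length : Int) n).foldl
      (fun result i =>
        -- result[i] = result[i] * 2 ; str * 2 is ported by hand as list-append of the chars (exact)
        PySem.List.pySetD result i
          (String.ofList ((PySem.List.pyGetD result i "").toList ++ (PySem.List.pyGetD result i "").toList)))
      (string.toList.map (fun c => String.ofList [c]))

-- ===== PRECONDITION & SPEC =====
-- Pre_ admits exactly the third branch: on n ≤ 0 / empty string A returns "" and on
-- n > len(string) A returns the argument string itself — both str values, not lists of str,
-- so they are not values of the declared return type List String and are excluded.
def Pre_double_n_th (string : String) (n : Int) : Prop :=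
  0 < n ∧ string.toList ≠ [] ∧ n ≤ (string.toList.length : Int)
instance (string : String) (n : Int) : Decidable (Pre_double_n_th string n) := by
  unfold Pre_double_n_th; infer_instance

def pvWitness_double_n_th : String × Int := ("abcde", 2)

def Spec_double_n_th (string : String) (n : Int) (out : List String) : Prop := out = double_n_th_alt string n
instance (string : String) (n : Int) (out : List String) : Decidable (Spec_double_n_th string n out) := by unfold Spec_double_n_th; infer_instance

-- ===== CLAIM (what is proved, stated in full; the proofs are below) =====
def Claim_equal_double_n_th : Prop := ∀ (string : String) (n : Int), Dom_double_n_th string n → Pre_double_n_th string n → Spec_double_n_th string n (double_n_th string n)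

-- ===== LEMMAS AND PROOFS =====

-- the doubling B applies to a selected cell
def pvDouble (s : String) : String := String.ofList (s.toList ++ s.toList)

-- B's sparse pass: length is preserved
lemma setfold_length (L : List Int) (r : List String) :
    (L.foldl (fun result i =>
        PySem.List.pySetD result i
          (String.ofList ((PySem.List.pyGetD result i "").toList ++ (PySem.List.pyGetD result i "").toList))) r).length
      = r.length := by
  induction L generalizing r with
  | nil => rfl
  | cons i L ih => rw [List.foldl_cons, ih, PySem.List.length_pySetD]

-- B's sparse pass, cell by cell: a cell is doubled iff its index occurs in the index list
lemma setfold_getD (L : List Int) (r : List String)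
    (hb : ∀ i ∈ L, 0 ≤ i ∧ i < (r.length : Int)) (hnd : L.Nodup) (j : Nat) (hj : j < r.length) :
    (L.foldl (fun result i =>
        PySem.List.pySetD result i
          (String.ofList ((PySem.List.pyGetD result i "").toList ++ (PySem.List.pyGetD result i "").toList))) r).getD j ""
      = if (j : Int) ∈ L then pvDouble (r.getD j "") else r.getD j "" := by
  induction L generalizing r with
  | nil => simp
  | cons i L ih =>
    obtain ⟨hi0, hilt⟩ := hb i (List.mem_cons_self ..)
    have hset : PySem.List.pySetD r i
        (String.ofList ((PySem.List.pyGetD r i "").toList ++ (PySem.List.pyGetD r i "").toList))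
        = r.set i.toNat (pvDouble (r.getD i.toNat "")) := by
      rw [PySem.List.pySetD_of_nonneg _ _ hi0, PySem.List.pyGetD_of_nonneg _ _ hi0, pvDouble]
    have hlen : (r.set i.toNat (pvDouble (r.getD i.toNat ""))).length = r.length := by
      simp
    rw [List.foldl_cons, hset, ih _ (by intro x hx; have := hb x (List.mem_cons_of_mem _ hx); omega)
      hnd.of_cons (by omega)]
    have hgetset : ∀ k : Nat, (r.set i.toNat (pvDouble (r.getD i.toNat ""))).getD k ""
        = if k = i.toNat then pvDouble (r.getD i.toNat "") else r.getD k "" := by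
      intro k
      rw [List.getD_eq_getElem?_getD, List.getElem?_set]
      by_cases hk : k = i.toNat
      · rw [if_pos hk.symm, if_pos (by omega), Option.getD_some, if_pos hk]
      · rw [if_neg (fun h => hk h.symm), ← List.getD_eq_getElem?_getD, if_neg hk]
    by_cases hmem : (j : Int) ∈ L
    · have hji : (j : Int) ≠ i := fun h => (List.nodup_cons.mp hnd).1 (h ▸ hmem)
      rw [if_pos hmem, if_pos (List.mem_cons_of_mem _ hmem), hgetset, if_neg (by omega)]
    · rw [if_neg hmem]
      by_cases hji : (j : Int) = i
      · have hjn : j = i.toNat := by omega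
        rw [if_pos (by simp [hji]), hgetset, if_pos hjn, hjn]
      · rw [if_neg (by simp [hji, hmem]), hgetset, if_neg (by omega)]

-- the positions range(n-1, len, n) are exactly those with (j+1) % n == 0
lemma mem_pyRange_iff_mod (n : Int) (hn : 0 < n) (len : Nat) (j : Nat) (hj : j < len) :
    (j : Int) ∈ PySem.List.pyRange (n - 1) (len : Int) n ↔ PySem.Int.mod ((j : Int) + 1) n = 0 := by
  rw [PySem.List.mem_pyRange_iff_of_pos hn, PySem.Int.mod_eq_zero_iff_dvd]
  constructor
  · rintro ⟨h1, h2, k, hk⟩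
    exact ⟨k + 1, by linear_combination hk⟩
  · rintro ⟨k, hk⟩
    have hk1 : 1 ≤ k := by nlinarith
    have hnk : n ≤ n * k := by nlinarith
    refine ⟨by linarith, by exact_mod_cast hj, k - 1, by linear_combination hk⟩

-- range(n-1, len, n) has no duplicate indices
lemma nodup_pyRange_pos (a b n : Int) (hn : 0 < n) : (PySem.List.pyRange a b n).Nodup := by
  rw [PySem.List.pyRange_of_pos a b hn]
  refine List.Nodup.map ?_ List.nodup_range
  intro x y h
  have h2 : n * (x : Int) = n * (y : Int) := by linarith
  exact_mod_cast mul_left_cancel₀ (by omega : n ≠ 0) h2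

-- ===== VERDICT (by name: the statement is the Claim_ definition above) =====
theorem double_n_th_spec : Claim_equal_double_n_th := by
  intro string n _ hpre
  obtain ⟨hn, hne, hle⟩ := hpre
  unfold Spec_double_n_th double_n_th double_n_th_alt
  rw [if_neg (by push Not; exact ⟨by omega, hne⟩), if_neg (by omega),
    if_neg (by push Not; exact ⟨by omega, hne⟩), if_neg (by omega)]
  set cs := string.toList with hcs
  -- A's loop is a map over the enumeration
  have hA : (PySem.List.enumerate cs 0).foldl
      (fun result ic =>
        if PySem.Int.mod (ic.1 + 1) n = 0 then result ++ [String.ofList [ic.2, ic.2]]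
        else result ++ [String.ofList [ic.2]]) []
      = (PySem.List.enumerate cs 0).map
          (fun ic => if PySem.Int.mod (ic.1 + 1) n = 0 then String.ofList [ic.2, ic.2] else String.ofList [ic.2]) := by
    have hfn : (fun (result : List String) (ic : Int × Char) =>
        if PySem.Int.mod (ic.1 + 1) n = 0 then result ++ [String.ofList [ic.2, ic.2]]
        else result ++ [String.ofList [ic.2]])
        = (fun result ic =>
            result ++ [if PySem.Int.mod (ic.1 + 1) n = 0 then String.ofList [ic.2, ic.2] else String.ofList [ic.2]]) := by
      funext result ic; split <;> rfl
    rw [hfn, PySem.List.foldl_append_singleton_eq_map, List.nil_append]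
  rw [hA]
  -- both sides elementwise
  have hb : ∀ i ∈ PySem.List.pyRange (n - 1) (cs.length : Int) n,
      0 ≤ i ∧ i < ((cs.map (fun c => String.ofList [c])).length : Int) := by
    intro i hi
    rw [PySem.List.mem_pyRange_iff_of_pos hn] at hi
    simp only [List.length_map]
    omega
  apply List.ext_getElem
  · rw [List.length_map, PySem.List.length_enumerate, setfold_length, List.length_map]
  · intro j hj1 hj2
    have hjlen : j < cs.length := by
      rw [List.length_map, PySem.List.length_enumerate] at hj1; exact hj1
    have hrlen : j < (cs.map (fun c => String.ofList [c])).length := by simpa using hjlen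
    have hgetD : ∀ (xs : List String) (h : j < xs.length), xs[j] = xs.getD j "" := by
      intro xs h
      rw [List.getD_eq_getElem?_getD, List.getElem?_eq_getElem h, Option.getD_some]
    rw [List.getElem_map, PySem.List.getElem_enumerate, hgetD _ hj2,
      setfold_getD _ _ hb (nodup_pyRange_pos _ _ _ hn) j hrlen]
    simp only [mem_pyRange_iff_mod n hn cs.length j hjlen, zero_add]
    have hinit : (cs.map (fun c => String.ofList [c])).getD j "" = String.ofList [cs[j]'hjlen] := by
      rw [List.getD_eq_getElem?_getD, List.getElem?_eq_getElem hrlen, Option.getD_some, List.getElem_map]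
    rw [hinit]
    by_cases hmod : PySem.Int.mod ((j : Int) + 1) n = 0
    · rw [if_pos hmod, if_pos hmod, pvDouble, String.toList_ofList]
      rfl
    · rw [if_neg hmod, if_neg hmod]
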